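-- pv_equiv track=rewrite | github.com/johnmarktaylor91/torchlens | torchlens/data_classes/interface.py | _format_list_with_line_breaks
-- ===== SOURCE A (Python) =====
-- def _format_list_with_line_breaks(lst, indent_chars: str, line_break_every=5) -> str:
--     """
--     Utility function to pretty print a list with line breaks, adding indent_chars every line.
--     """
--     s = f"\n{indent_chars}"
--     for i, item in enumerate(lst):
--         s += f"{item}"
--         if i < len(lst) - 1:
--             s += ", "
--         if ((i + 1) % line_break_every == 0) and (i < len(lst) - 1):
--             s += f"\n{indent_chars}"
--     return s
-- ===== SOURCE B (Python) =====
-- def _format_list_with_line_breaks(lst, indent_chars: str, line_break_every=5) -> str: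
--     """Pretty print a list: chunk it into groups of line_break_every items,
--     render each group comma-separated, and join groups with an indented break."""
--     chunks = []
--     rest = list(lst)
--     while rest:
--         chunks.append(rest[:line_break_every])
--         rest = rest[line_break_every:]
--     body = f", \n{indent_chars}".join(", ".join(f"{x}" for x in chunk) for chunk in chunks)
--     return f"\n{indent_chars}" + body
-- ===== Notes on version B (the rewrite author's own statement) =====
-- stated objective: simpler
-- what changed: Replaces the index-counting loop with per-element comma/break conditionals by chunk-then-join: partition the list into groups of line_break_every items and join the rendered groups with ', \n'+indent, so no per-item boundary/modulo tests or repeated string concatenation remain (str.join builds the output); Pre_ restricts to the natural domain of a positive break period (kept: empty list with any period), since at 0 A raises ZeroDivisionError on nonempty lists and for negative periods A's every-|n| break is an accident of Python's sign-following modulo.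
-- outside the precondition, e.g. on _format_list_with_line_breaks(['a', 'b'], '', -1): A returns '\na, \nb', B does not finish within the time limit
import Mathlib
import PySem

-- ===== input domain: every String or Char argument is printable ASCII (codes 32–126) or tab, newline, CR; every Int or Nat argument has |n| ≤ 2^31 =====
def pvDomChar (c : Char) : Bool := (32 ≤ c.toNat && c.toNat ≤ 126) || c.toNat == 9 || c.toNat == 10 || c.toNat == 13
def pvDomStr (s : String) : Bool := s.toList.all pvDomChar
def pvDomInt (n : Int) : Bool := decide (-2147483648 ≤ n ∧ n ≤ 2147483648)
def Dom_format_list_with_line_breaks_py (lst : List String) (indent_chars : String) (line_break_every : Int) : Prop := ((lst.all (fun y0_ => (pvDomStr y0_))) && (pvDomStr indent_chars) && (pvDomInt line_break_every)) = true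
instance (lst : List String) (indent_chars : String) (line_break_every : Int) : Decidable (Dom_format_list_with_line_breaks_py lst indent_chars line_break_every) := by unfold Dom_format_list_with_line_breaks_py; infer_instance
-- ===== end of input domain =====

-- B replaces A's index-counting loop by chunk-the-list-then-join (objective: simpler decomposition).


-- ===== PORT A =====
-- the for-loop over enumerate(lst), accumulator s; conditions in source order
def pvLoopA (n : Int) (lbe : Int) (ind : String) : String → List (Int × String) → String
  | s, [] => s
  | s, (i, item) :: rest =>
    let s1 := s ++ item
    let s2 := if i < n - 1 then s1 ++ ", " else s1
    let s3 := if PySem.Int.mod (i + 1) lbe = 0 ∧ i < n - 1 then s2 ++ "\n" ++ ind else s2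
    pvLoopA n lbe ind s3 rest

def format_list_with_line_breaks_py (lst : List String) (indent_chars : String) (line_break_every : Int) : String :=
  pvLoopA (lst.length : Int) line_break_every indent_chars ("\n" ++ indent_chars) (PySem.List.enumerate lst)

-- ===== PORT B =====
-- the while-loop of Source B: peel rest[:k] / rest[k:], written head + take/drop (k-1) so the
-- recursion is length-decreasing; for k ≥ 1 (all of Pre_) these are the same slices
def pvChunks (k : Nat) : List String → List (List String)
  | [] => []
  | x :: xs => (x :: xs.take (k - 1)) :: pvChunks k (xs.drop (k - 1))
termination_by l => l.length
decreasing_by simp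

def format_list_with_line_breaks_py_alt (lst : List String) (indent_chars : String) (line_break_every : Int) : String :=
  "\n" ++ indent_chars ++
    PySem.Str.join (", \n" ++ indent_chars)
      ((pvChunks line_break_every.toNat lst).map (fun c => PySem.Str.join ", " c))

-- ===== PRECONDITION & SPEC =====
-- Pre_ restricts to the function's natural domain, a positive break period: at
-- line_break_every = 0 A raises ZeroDivisionError on any nonempty list, and for negative
-- periods A's every-|n| break is an accident of Python's sign-following modulo while B's
-- slicing loop does not terminate; the empty list is kept for any period (both return the bare indent).
def Pre_format_list_with_line_breaks_py (lst : List String) (indent_chars : String) (line_break_every : Int) : Prop :=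
  1 ≤ line_break_every ∨ lst = []
instance (lst : List String) (indent_chars : String) (line_break_every : Int) : Decidable (Pre_format_list_with_line_breaks_py lst indent_chars line_break_every) := by unfold Pre_format_list_with_line_breaks_py; infer_instance

def pvWitness_format_list_with_line_breaks_py : List String × String × Int := (["a", "bb", "c"], "  ", 2)

def Spec_format_list_with_line_breaks_py (lst : List String) (indent_chars : String) (line_break_every : Int) (out : String) : Prop := out = format_list_with_line_breaks_py_alt lst indent_chars line_break_every
instance (lst : List String) (indent_chars : String) (line_break_every : Int) (out : String) : Decidable (Spec_format_list_with_line_breaks_py lst indent_chars line_break_every out) := by unfold Spec_format_list_with_line_breaks_py; infer_instance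

-- ===== CLAIM (what is proved, stated in full; the proofs are below) =====
def Claim_equal_format_list_with_line_breaks_py : Prop := ∀ (lst : List String) (indent_chars : String) (line_break_every : Int), Dom_format_list_with_line_breaks_py lst indent_chars line_break_every → Pre_format_list_with_line_breaks_py lst indent_chars line_break_every → Spec_format_list_with_line_breaks_py lst indent_chars line_break_every (format_list_with_line_breaks_py lst indent_chars line_break_every)

-- ===== LEMMAS AND PROOFS =====

-- pure (accumulator-free) rendering of A's loop body, carrying the running index
def pvB (lbe : Int) (ind : String) : Nat → List String → String
  | _, [] => ""
  | _, [x] => x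
  | i, x :: y :: xs => x ++ ", " ++ (if PySem.Int.mod ((i : Int) + 1) lbe = 0 then "\n" ++ ind else "") ++ pvB lbe ind (i + 1) (y :: xs)

-- same rendering with a countdown-to-break counter instead of the global index
def pvC (k : Nat) (ind : String) : Nat → List String → String
  | _, [] => ""
  | _, [x] => x
  | c, x :: y :: xs => x ++ ", " ++ (if c = 1 then "\n" ++ ind else "") ++ pvC k ind (if c = 1 then k else c - 1) (y :: xs)

lemma comma_nl : (", " : String) ++ "\n" = ", \n" := String.toList_inj.mp (by simp)

lemma pvLoopA_eq_pvB (lbe : Int) (ind : String) :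
    ∀ (l : List String) (i : Nat) (s : String),
      pvLoopA ((i : Int) + l.length) lbe ind s (PySem.List.enumerate l (i : Int)) = s ++ pvB lbe ind i l := by
  intro l
  induction l with
  | nil => intro i s; simp [pvLoopA, pvB, PySem.List.enumerate]
  | cons x xs ih =>
    intro i s
    rw [PySem.List.enumerate_cons]
    cases xs with
    | nil =>
      have hlt : ¬ ((i : Int) < (i : Int) + (([x]).length : Int) - 1) := by simp
      simp only [pvLoopA, hlt, and_false, if_false]
      simp [PySem.List.enumerate, pvLoopA, pvB]
    | cons y ys =>
      have hlt : (i : Int) < (i : Int) + ((x :: y :: ys).length : Int) - 1 := by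
        simp only [List.length_cons]; push_cast; omega
      have harg : (i : Int) + ((x :: y :: ys).length : Int) = ((i+1 : Nat) : Int) + ((y :: ys).length : Int) := by
        simp only [List.length_cons]; push_cast; omega
      simp only [pvLoopA, hlt, and_true, if_true]
      have hcast : ((i : Int) + 1) = ((i + 1 : Nat) : Int) := by push_cast; omega
      rw [harg, hcast, ih (i+1)]
      simp only [pvB, ← hcast]
      split_ifs with h
      · simp only [String.append_assoc]
      · simp [String.append_assoc]

lemma pymod_zero_iff (lbe : Int) (m : Nat) :
    PySem.Int.mod (m : Int) lbe = 0 ↔ m % lbe.natAbs = 0 := by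
  rw [PySem.Int.mod_eq_zero_iff_dvd, ← Int.natAbs_dvd]
  norm_cast
  exact Nat.dvd_iff_mod_eq_zero

lemma succ_mod (k i : Nat) (hk : 1 ≤ k) : (i + 1) % k = (i % k + 1) % k := by
  conv_lhs => rw [Nat.add_mod]
  rcases Nat.eq_or_lt_of_le hk with h | h
  · rw [← h]; simp [Nat.mod_one]
  · rw [Nat.mod_eq_of_lt h]

lemma next_cnt (k i : Nat) (hk : 1 ≤ k) :
    k - (i + 1) % k = if (i + 1) % k = 0 then k else (k - i % k) - 1 := by
  have h1 : i % k < k := Nat.mod_lt _ (by omega)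
  have h2 := succ_mod k i hk
  rcases Nat.lt_or_ge (i % k + 1) k with h | h
  · rw [h2, Nat.mod_eq_of_lt h]
    have : ¬ (i % k + 1 = 0) := by omega
    simp only [h2, Nat.mod_eq_of_lt h, this, if_false]
    omega
  · have h3 : i % k = k - 1 := by omega
    have h4 : (i % k + 1) = k := by omega
    rw [h2, h4, Nat.mod_self]
    simp

lemma break_iff (k i : Nat) (hk : 1 ≤ k) : ((i + 1) % k = 0) ↔ (k - i % k = 1) := by
  have h1 : i % k < k := Nat.mod_lt _ (by omega)
  have h2 := succ_mod k i hk
  rcases Nat.lt_or_ge (i % k + 1) k with h | h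
  · rw [h2, Nat.mod_eq_of_lt h]; omega
  · have h4 : (i % k + 1) = k := by omega
    rw [h2, h4, Nat.mod_self]; omega

lemma pvB_eq_pvC (lbe : Int) (hlbe : lbe ≠ 0) (ind : String) :
    ∀ (l : List String) (i : Nat),
      pvB lbe ind i l = pvC lbe.natAbs ind (lbe.natAbs - i % lbe.natAbs) l := by
  intro l
  induction l with
  | nil => intro i; simp [pvB, pvC]
  | cons x xs ih =>
    intro i
    cases xs with
    | nil => simp [pvB, pvC]
    | cons y ys =>
      have hk : 1 ≤ lbe.natAbs := by omega
      have hcast : ((i : Int) + 1) = (((i + 1 : Nat)) : Int) := by push_cast; omega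
      simp only [pvB, pvC, hcast, pymod_zero_iff, ih (i+1)]
      rw [next_cnt lbe.natAbs i hk]
      simp only [break_iff lbe.natAbs i hk]

lemma join_nil' (sep : String) : PySem.Str.join sep ([] : List String) = "" := by
  simp [PySem.Str.join]

lemma join_singleton' (sep x : String) : PySem.Str.join sep [x] = x := by
  simp only [PySem.Str.join, List.map_cons, List.map_nil,
    PySem.Chars.join_singleton, String.ofList_toList]

lemma join_cons_cons' (sep x y : String) (xs : List String) :
    PySem.Str.join sep (x :: y :: xs) = x ++ sep ++ PySem.Str.join sep (y :: xs) := by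
  apply String.toList_inj.mp
  simp [PySem.Str.toList_join, PySem.Chars.join_cons_cons, String.toList_append]

lemma join_cons' (sep a : String) (rest : List String) :
    PySem.Str.join sep (a :: rest) = a ++ (if rest = [] then "" else sep ++ PySem.Str.join sep rest) := by
  cases rest with
  | nil => simp [join_singleton']
  | cons r rs => simp [join_cons_cons', String.append_assoc]

lemma pvC_chunk (k : Nat) (hk : 1 ≤ k) (ind : String) :
    ∀ (l : List String) (c : Nat), 1 ≤ c →
      pvC k ind c l = PySem.Str.join ", " (l.take c) ++
        (if l.length ≤ c then "" else ", " ++ "\n" ++ ind ++ pvC k ind k (l.drop c)) := by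
  intro l
  induction l with
  | nil => intro c hc; simp [pvC, join_nil']
  | cons x xs ih =>
    intro c hc
    cases xs with
    | nil =>
      have h1 : (List.take c [x] : List String) = [x] := by
        cases c with | zero => omega | succ n => simp
      simp [pvC, h1, join_singleton', hc]
    | cons y ys =>
      rcases Nat.eq_or_lt_of_le hc with h1 | h1
      · -- c = 1 : break falls right after x
        subst h1
        have hlen : ¬ ((x :: y :: ys).length ≤ 1) := by simp
        simp only [pvC, List.take_succ_cons, List.take_zero, join_singleton',
          List.drop_succ_cons, List.drop_zero, hlen, if_false]
        simp only [if_true, String.append_assoc]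
      · -- c ≥ 2 : no break after x, recurse with c - 1
        obtain ⟨m, rfl⟩ : ∃ m, c = m + 2 := ⟨c - 2, by omega⟩
        have hcond : ¬ (m + 2 = 1) := by omega
        simp only [pvC, hcond, if_false, show m + 2 - 1 = m + 1 from rfl,
          ih (m+1) (by omega), List.take_succ_cons, List.drop_succ_cons, join_cons_cons',
          List.length_cons]
        split_ifs with ha hb hb
        · simp [String.append_assoc]
        · omega
        · omega
        · simp [String.append_assoc]

lemma pvJoin_chunks (k : Nat) (hk : 1 ≤ k) (ind : String) :
    ∀ (l : List String),
      PySem.Str.join (", \n" ++ ind) ((pvChunks k l).map (fun c => PySem.Str.join ", " c)) = pvC k ind k l := by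
  have main : ∀ (n : Nat) (l : List String), l.length ≤ n →
      PySem.Str.join (", \n" ++ ind) ((pvChunks k l).map (fun c => PySem.Str.join ", " c)) = pvC k ind k l := by
    intro n
    induction n with
    | zero =>
      intro l hl
      have : l = [] := by cases l <;> simp_all
      subst this
      simp [pvChunks, pvC, join_nil']
    | succ n ih =>
      intro l hl
      cases l with
      | nil => simp [pvChunks, pvC, join_nil']
      | cons x xs =>
        obtain ⟨m, rfl⟩ : ∃ m, k = m + 1 := ⟨k - 1, by omega⟩
        rw [pvChunks]
        simp only [Nat.add_sub_cancel, List.map_cons]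
        rw [join_cons', pvC_chunk (m+1) hk ind (x :: xs) (m+1) hk]
        simp only [List.take_succ_cons, List.drop_succ_cons, List.length_cons]
        have hlen : (xs.drop m).length ≤ n := by simp at hl ⊢; omega
        by_cases hdrop : xs.length ≤ m
        · have h1 : xs.drop m = [] := by rw [List.drop_eq_nil_iff]; omega
          have h2 : xs.take m = xs := List.take_of_length_le hdrop
          have h3 : xs.length + 1 ≤ m + 1 := by omega
          rw [h1, h2]
          simp [pvChunks, h3]
        · have h3 : ¬ (xs.length + 1 ≤ m + 1) := by omega
          have h4 : xs.drop m ≠ [] := by rw [ne_eq, List.drop_eq_nil_iff]; omega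
          have h5 : (pvChunks (m+1) (xs.drop m)).map (fun c => PySem.Str.join ", " c) ≠ [] := by
            cases h : xs.drop m with
            | nil => exact absurd h h4
            | cons z zs => simp [pvChunks]
          rw [if_neg h5, if_neg h3, ih (xs.drop m) hlen]
          rw [← comma_nl]
  intro l; exact main l.length l le_rfl

-- ===== VERDICT (by name: the statement is the Claim_ definition above) =====
theorem format_list_with_line_breaks_py_spec : Claim_equal_format_list_with_line_breaks_py := by
  intro lst ind lbe _ hpre
  unfold Spec_format_list_with_line_breaks_py format_list_with_line_breaks_py format_list_with_line_breaks_py_alt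
  rcases hpre with hlbe | hnil
  · have hlbe0 : lbe ≠ 0 := by omega
    have habs : lbe.toNat = lbe.natAbs := by omega
    have hk : 1 ≤ lbe.natAbs := by omega
    have h0 := pvLoopA_eq_pvB lbe ind lst 0 ("\n" ++ ind)
    simp only [Nat.cast_zero, zero_add] at h0
    rw [h0, pvB_eq_pvC lbe hlbe0 ind, habs, pvJoin_chunks lbe.natAbs hk ind]
    simp [String.append_assoc]
  · subst hnil
    simp [pvLoopA, pvChunks, PySem.List.enumerate, PySem.Str.join, PySem.Chars.join, List.intercalate]
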